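-- pv_equiv track=rewrite | github.com/cpatrasciuc/algorithm-contests | hackercup/2014/qualification/square_detector.py | solve
-- ===== SOURCE A (Python) =====
-- def solve(board):
--     min_x = 100000
--     max_x = -1
--     min_y = 100000
--     max_y = -1
--     empty = True
--     for (x, line) in enumerate(board):
--         for (y, cell) in enumerate(line):
--             if cell == "#":
--                 empty = False
--                 min_x = min(x, min_x)
--                 max_x = max(x, max_x)
--                 min_y = min(y, min_y)
--                 max_y = max(y, max_y)
--     if empty:
--         return "NO"
--     if max_x - min_x != max_y - min_y:
--         return "NO"
--     for x in range(min_x, max_x + 1):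
--         for y in range(min_y, max_y + 1):
--             if board[x][y] != "#":
--                 return "NO"
--     return "YES"
-- ===== SOURCE B (Python) =====
-- def solve(board):
--     count = 0
--     min_x = 100000
--     max_x = -1
--     min_y = 100000
--     max_y = -1
--     for (x, line) in enumerate(board):
--         for (y, cell) in enumerate(line):
--             if cell == "#":
--                 count += 1
--                 min_x = min(x, min_x)
--                 max_x = max(x, max_x)
--                 min_y = min(y, min_y)
--                 max_y = max(y, max_y)
--     if count == 0:
--         return "NO"
--     if max_x - min_x == max_y - min_y and count == (max_x - min_x + 1) ** 2:
--         return "YES"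
--     return "NO"
-- ===== Notes on version B (the rewrite author's own statement) =====
-- stated objective: simpler
-- what changed: B drops A's second nested verification loop entirely: it counts '#' cells during the single bounding-box scan and decides YES by arithmetic (square bounding box and count equal to its area), since the count can never exceed the box area.
import Mathlib
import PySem

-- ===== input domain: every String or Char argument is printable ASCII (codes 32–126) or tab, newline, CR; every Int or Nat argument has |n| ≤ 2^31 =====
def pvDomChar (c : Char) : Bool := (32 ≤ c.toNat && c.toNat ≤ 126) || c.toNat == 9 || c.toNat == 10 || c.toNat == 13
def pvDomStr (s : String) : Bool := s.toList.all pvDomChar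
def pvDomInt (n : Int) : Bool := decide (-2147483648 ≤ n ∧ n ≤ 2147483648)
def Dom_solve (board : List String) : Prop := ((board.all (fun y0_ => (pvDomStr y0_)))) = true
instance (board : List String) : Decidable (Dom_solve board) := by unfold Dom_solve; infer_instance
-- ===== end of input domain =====

-- B replaces A's second nested verification loop by counting '#' cells during the single
-- bounding-box scan and checking count = (square) bounding-box area — simpler, one pass.

-- ===== PORT A =====
def solve (board : List String) : String :=
  let st := (PySem.List.enumerate board 0).foldl (fun s xl =>
      (PySem.List.enumerate xl.2.toList 0).foldl (fun t yc =>
        if yc.2 = '#' then (min xl.1 t.1, max xl.1 t.2.1, min yc.1 t.2.2.1, max yc.1 t.2.2.2.1, false)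
        else t) s)
    ((100000 : Int), (-1 : Int), (100000 : Int), (-1 : Int), true)
  if st.2.2.2.2 then "NO"
  else if st.2.1 - st.1 ≠ st.2.2.2.1 - st.2.2.1 then "NO"
  else if (PySem.List.pyRange st.1 (st.2.1 + 1) 1).all (fun x =>
        (PySem.List.pyRange st.2.2.1 (st.2.2.2.1 + 1) 1).all (fun y =>
          match PySem.List.pyGet? board x with
          | some line =>
            match PySem.Str.pyGet? line y with
            | some c => c == '#'
            | none => false   -- Python raises IndexError here; Pre_solve excludes such boards
          | none => false))   -- Python raises IndexError here; unreachable under Pre_solve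
  then "YES" else "NO"

-- ===== PORT B =====
def solve_alt (board : List String) : String :=
  let st := (PySem.List.enumerate board 0).foldl (fun s xl =>
      (PySem.List.enumerate xl.2.toList 0).foldl (fun t yc =>
        if yc.2 = '#' then (t.1 + 1, min xl.1 t.2.1, max xl.1 t.2.2.1, min yc.1 t.2.2.2.1, max yc.1 t.2.2.2.2)
        else t) s)
    ((0 : Int), (100000 : Int), (-1 : Int), (100000 : Int), (-1 : Int))
  if st.1 = 0 then "NO"
  else if st.2.2.1 - st.2.1 = st.2.2.2.2 - st.2.2.2.1 ∧ st.1 = (st.2.2.1 - st.2.1 + 1) ^ 2 then "YES"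
  else "NO"

-- ===== PRECONDITION & SPEC =====
-- the positions of the '#' cells of the board (spec-level; used only by Pre_solve and the proofs)
def pvHash (board : List String) : List (Int × Int) :=
  (PySem.List.enumerate board 0).flatMap (fun xl =>
    (PySem.List.enumerate xl.2.toList 0).filterMap (fun yc =>
      if yc.2 = '#' then some (xl.1, yc.1) else none))

-- min/max components of a fold over the hash list
def pvMnx (H : List (Int × Int)) : Int := H.foldl (fun m p => min p.1 m) 100000
def pvMxx (H : List (Int × Int)) : Int := H.foldl (fun m p => max p.1 m) (-1)
def pvMny (H : List (Int × Int)) : Int := H.foldl (fun m p => min p.2 m) 100000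
def pvMxy (H : List (Int × Int)) : Int := H.foldl (fun m p => max p.2 m) (-1)

-- Pre_solve excludes exactly the boards on which A raises IndexError: those whose row-major
-- verification scan of a non-empty square '#'-bounding box reaches a missing cell (a row shorter
-- than the column index) before any present non-'#' cell. A returns on every other board.
def Pre_solve (board : List String) : Prop :=
  ¬ (pvHash board ≠ [] ∧
     pvMxx (pvHash board) - pvMnx (pvHash board) = pvMxy (pvHash board) - pvMny (pvHash board) ∧
     ∃ x ∈ PySem.List.pyRange (pvMnx (pvHash board)) (pvMxx (pvHash board) + 1) 1,
       ∃ y ∈ PySem.List.pyRange (pvMny (pvHash board)) (pvMxy (pvHash board) + 1) 1,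
         ((board.getD x.toNat "").length : Int) ≤ y ∧
         ∀ x' ∈ PySem.List.pyRange (pvMnx (pvHash board)) (pvMxx (pvHash board) + 1) 1,
           ∀ y' ∈ PySem.List.pyRange (pvMny (pvHash board)) (pvMxy (pvHash board) + 1) 1,
             (x' < x ∨ (x' = x ∧ y' < y)) → (x', y') ∈ pvHash board)
instance (board : List String) : Decidable (Pre_solve board) := by unfold Pre_solve; infer_instance

def pvWitness_solve : List String := ["##", "##"]

def Spec_solve (board : List String) (out : String) : Prop := out = solve_alt board
instance (board : List String) (out : String) : Decidable (Spec_solve board out) := by unfold Spec_solve; infer_instance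

-- ===== CLAIM (what is proved, stated in full; the proofs are below) =====
def Claim_equal_solve : Prop := ∀ (board : List String), Dom_solve board → Pre_solve board → Spec_solve board (solve board)

-- ===== LEMMAS AND PROOFS =====

-- generic: the nested "for each cell, if '#' then update" fold is a fold over the '#' positions
theorem pv_inner_fold {σ : Type} (upd : Int × Int → σ → σ) (x : Int) (cs : List (Int × Char)) (s : σ) :
    cs.foldl (fun t yc => if yc.2 = '#' then upd (x, yc.1) t else t) s
      = (cs.filterMap (fun yc => if yc.2 = '#' then some (x, yc.1) else none)).foldl (fun t p => upd p t) s := by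
  induction cs generalizing s with
  | nil => rfl
  | cons c cs ih =>
    by_cases h : c.2 = '#' <;> simp [h, ih]

theorem pv_rows_fold {σ : Type} (upd : Int × Int → σ → σ) (rows : List (Int × String)) (s : σ) :
    rows.foldl (fun s xl =>
        (PySem.List.enumerate xl.2.toList 0).foldl (fun t yc => if yc.2 = '#' then upd (xl.1, yc.1) t else t) s) s
      = (rows.flatMap (fun xl =>
          (PySem.List.enumerate xl.2.toList 0).filterMap (fun yc =>
            if yc.2 = '#' then some (xl.1, yc.1) else none))).foldl (fun t p => upd p t) s := by
  induction rows generalizing s with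
  | nil => rfl
  | cons r rows ih =>
    simp only [List.foldl_cons, List.flatMap_cons, List.foldl_append]
    rw [pv_inner_fold, ih]

theorem pv_fold_eq {σ : Type} (upd : Int × Int → σ → σ) (board : List String) (s : σ) :
    (PySem.List.enumerate board 0).foldl (fun s xl =>
        (PySem.List.enumerate xl.2.toList 0).foldl (fun t yc => if yc.2 = '#' then upd (xl.1, yc.1) t else t) s) s
      = (pvHash board).foldl (fun t p => upd p t) s := by
  rw [pvHash, ← pv_rows_fold]

theorem pv_foldl_updA (H : List (Int × Int)) (s : Int × Int × Int × Int × Bool) :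
    H.foldl (fun t p => (min p.1 t.1, max p.1 t.2.1, min p.2 t.2.2.1, max p.2 t.2.2.2.1, false)) s
      = (H.foldl (fun m p => min p.1 m) s.1, H.foldl (fun m p => max p.1 m) s.2.1,
         H.foldl (fun m p => min p.2 m) s.2.2.1, H.foldl (fun m p => max p.2 m) s.2.2.2.1,
         s.2.2.2.2 && H.isEmpty) := by
  induction H generalizing s with
  | nil => simp
  | cons p H ih => simp [ih]

theorem pv_foldl_updB (H : List (Int × Int)) (s : Int × Int × Int × Int × Int) :
    H.foldl (fun t p => (t.1 + 1, min p.1 t.2.1, max p.1 t.2.2.1, min p.2 t.2.2.2.1, max p.2 t.2.2.2.2)) s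
      = (s.1 + H.length, H.foldl (fun m p => min p.1 m) s.2.1, H.foldl (fun m p => max p.1 m) s.2.2.1,
         H.foldl (fun m p => min p.2 m) s.2.2.2.1, H.foldl (fun m p => max p.2 m) s.2.2.2.2) := by
  induction H generalizing s with
  | nil => simp
  | cons p H ih => simp [ih]; omega

-- the two scans, characterized through pvHash
theorem pv_stA (board : List String) :
    ((PySem.List.enumerate board 0).foldl (fun s xl =>
        (PySem.List.enumerate xl.2.toList 0).foldl (fun t yc =>
          if yc.2 = '#' then (min xl.1 t.1, max xl.1 t.2.1, min yc.1 t.2.2.1, max yc.1 t.2.2.2.1, false)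
          else t) s)
      ((100000 : Int), (-1 : Int), (100000 : Int), (-1 : Int), true))
      = (pvMnx (pvHash board), pvMxx (pvHash board), pvMny (pvHash board), pvMxy (pvHash board),
         (pvHash board).isEmpty) := by
  have h := pv_fold_eq (σ := Int × Int × Int × Int × Bool)
    (fun p t => (min p.1 t.1, max p.1 t.2.1, min p.2 t.2.2.1, max p.2 t.2.2.2.1, false))
    board (100000, -1, 100000, -1, true)
  refine Eq.trans h ?_
  rw [pv_foldl_updA]
  simp [pvMnx, pvMxx, pvMny, pvMxy]

theorem pv_stB (board : List String) :
    ((PySem.List.enumerate board 0).foldl (fun s xl =>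
        (PySem.List.enumerate xl.2.toList 0).foldl (fun t yc =>
          if yc.2 = '#' then (t.1 + 1, min xl.1 t.2.1, max xl.1 t.2.2.1, min yc.1 t.2.2.2.1, max yc.1 t.2.2.2.2)
          else t) s)
      ((0 : Int), (100000 : Int), (-1 : Int), (100000 : Int), (-1 : Int)))
      = (((pvHash board).length : Int), pvMnx (pvHash board), pvMxx (pvHash board),
         pvMny (pvHash board), pvMxy (pvHash board)) := by
  have h := pv_fold_eq (σ := Int × Int × Int × Int × Int)
    (fun p t => (t.1 + 1, min p.1 t.2.1, max p.1 t.2.2.1, min p.2 t.2.2.2.1, max p.2 t.2.2.2.2))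
    board (0, 100000, -1, 100000, -1)
  refine Eq.trans h ?_
  rw [pv_foldl_updB]
  simp [pvMnx, pvMxx, pvMny, pvMxy]

theorem pv_foldl_min (f : Int × Int → Int) (l : List (Int × Int)) (i : Int) :
    l.foldl (fun m p => min (f p) m) i ≤ i ∧ ∀ p ∈ l, l.foldl (fun m p => min (f p) m) i ≤ f p := by
  induction l generalizing i with
  | nil => simp
  | cons a l ih =>
    refine ⟨le_trans (ih (min (f a) i)).1 (by simp), ?_⟩
    intro p hp
    rcases List.mem_cons.mp hp with rfl | hp
    · exact le_trans (ih (min (f p) i)).1 (by simp)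
    · exact (ih (min (f a) i)).2 p hp

theorem pv_foldl_max (f : Int × Int → Int) (l : List (Int × Int)) (i : Int) :
    i ≤ l.foldl (fun m p => max (f p) m) i ∧ ∀ p ∈ l, f p ≤ l.foldl (fun m p => max (f p) m) i := by
  induction l generalizing i with
  | nil => simp
  | cons a l ih =>
    refine ⟨le_trans (by simp) (ih (max (f a) i)).1, ?_⟩
    intro p hp
    rcases List.mem_cons.mp hp with rfl | hp
    · exact le_trans (by simp) (ih (max (f p) i)).1
    · exact (ih (max (f a) i)).2 p hp

theorem pv_foldl_min_lb (f : Int × Int → Int) (l : List (Int × Int)) (i : Int)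
    (hi : 0 ≤ i) (hf : ∀ p ∈ l, 0 ≤ f p) : 0 ≤ l.foldl (fun m p => min (f p) m) i := by
  induction l generalizing i with
  | nil => simpa
  | cons a l ih =>
    exact ih (min (f a) i) (le_min (hf a (by simp)) hi) (fun p hp => hf p (by simp [hp]))

theorem pv_mem_hash (board : List String) (p : Int × Int) :
    p ∈ pvHash board ↔ ∃ (k : Nat) (hk : k < board.length) (j : Nat)
      (hj : j < board[k].toList.length), p = ((k : Int), (j : Int)) ∧ board[k].toList[j] = '#' := by
  simp only [pvHash, List.mem_flatMap, PySem.List.mem_enumerate_iff, List.mem_filterMap]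
  constructor
  · rintro ⟨xl, ⟨k, hk, rfl⟩, yc, ⟨j, hj, rfl⟩, hif⟩
    split at hif
    · next hc =>
      cases hif
      exact ⟨k, hk, j, hj, by simp, hc⟩
    · cases hif
  · rintro ⟨k, hk, j, hj, rfl, hc⟩
    exact ⟨(k, board[k]), ⟨k, hk, by simp⟩, ((j : Int), board[k].toList[j]),
      ⟨j, hj, by simp⟩, by simp [hc]⟩

theorem pv_hash_nonneg (board : List String) (p : Int × Int) (hp : p ∈ pvHash board) :
    0 ≤ p.1 ∧ 0 ≤ p.2 := by
  rw [pv_mem_hash] at hp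
  obtain ⟨k, hk, j, hj, rfl, _⟩ := hp
  exact ⟨Int.natCast_nonneg k, Int.natCast_nonneg j⟩

-- the cell test of A's verification loop hits exactly the '#' positions
theorem pv_check_iff (board : List String) (x y : Int) (hx : 0 ≤ x) (hy : 0 ≤ y) :
    ((match PySem.List.pyGet? board x with
      | some line =>
        match PySem.Str.pyGet? line y with
        | some c => c == '#'
        | none => false
      | none => false) = true) ↔ (x, y) ∈ pvHash board := by
  have a2 : ∀ (s : String) (i : Int), 0 ≤ i → PySem.Str.pyGet? s i = s.toList[i.toNat]? := by
    intro s i h; simp [PySem.Str.pyGet?, PySem.Chars.pyGet?, PySem.List.pyGet?_of_nonneg s.toList h]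
  rw [pv_mem_hash, PySem.List.pyGet?_of_nonneg board hx]
  constructor
  · intro h
    cases h1 : board[x.toNat]? with
    | none => rw [h1] at h; cases h
    | some line =>
      rw [h1] at h
      dsimp only at h
      have hlen : x.toNat < board.length := (List.getElem?_eq_some_iff.mp h1).1
      have hline : board[x.toNat] = line := (List.getElem?_eq_some_iff.mp h1).2
      cases h2 : PySem.Str.pyGet? line y with
      | none => rw [h2] at h; cases h
      | some c =>
        rw [h2] at h
        have hc : c = '#' := by simpa using h
        have h2' : line.toList[y.toNat]? = some c := by
          rw [← a2 line y hy, h2]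
        refine ⟨x.toNat, hlen, y.toNat, ?_, ?_, ?_⟩
        · simp only [hline]; exact (List.getElem?_eq_some_iff.mp h2').1
        · simp [Int.toNat_of_nonneg hx, Int.toNat_of_nonneg hy]
        · subst hc; simp only [hline]; exact (List.getElem?_eq_some_iff.mp h2').2
  · rintro ⟨k, hk, j, hj, hp, hc⟩
    have hxk : x = (k : Int) := congrArg Prod.fst hp
    have hyj : y = (j : Int) := congrArg Prod.snd hp
    subst hxk; subst hyj
    simp only [Int.toNat_natCast]
    rw [List.getElem?_eq_getElem hk]
    have : PySem.Str.pyGet? board[k] (j : Int) = some '#' := by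
      rw [a2 _ _ (Int.natCast_nonneg j), Int.toNat_natCast,
        List.getElem?_eq_getElem hj, hc]
    dsimp only
    rw [this]
    rfl

-- pvHash has no duplicate positions
theorem pv_hash_nodup (board : List String) : (pvHash board).Nodup := by
  rw [pvHash, List.Nodup, List.pairwise_flatMap]
  constructor
  · intro xl _
    rw [List.pairwise_filterMap]
    refine (PySem.List.pairwise_lt_enumerate _ _).imp ?_
    intro a b hab p hp q hq
    split at hp
    · cases hp
      split at hq
      · cases hq
        intro hpq
        exact absurd (congrArg Prod.snd hpq) (by simpa using hab.ne)
      · cases hq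
    · cases hp
  · refine (PySem.List.pairwise_lt_enumerate _ _).imp ?_
    intro a b hab p hp q hq
    have hp1 : p.1 = a.1 := by
      rcases List.mem_filterMap.mp hp with ⟨yc, _, h⟩
      split at h
      · cases h; rfl
      · cases h
    have hq1 : q.1 = b.1 := by
      rcases List.mem_filterMap.mp hq with ⟨yc, _, h⟩
      split at h
      · cases h; rfl
      · cases h
    intro hpq
    rw [hpq] at hp1
    omega

-- the core counting argument: the verification loop succeeds iff count = bounding-box area
theorem pv_main (board : List String) (H : List (Int × Int)) (hH : H = pvHash board)
    (hne : H ≠ []) (hsq : pvMxx H - pvMnx H = pvMxy H - pvMny H) :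
    ((PySem.List.pyRange (pvMnx H) (pvMxx H + 1) 1).all (fun x =>
        (PySem.List.pyRange (pvMny H) (pvMxy H + 1) 1).all (fun y =>
          match PySem.List.pyGet? board x with
          | some line =>
            match PySem.Str.pyGet? line y with
            | some c => c == '#'
            | none => false
          | none => false)) = true)
      ↔ (H.length : Int) = (pvMxx H - pvMnx H + 1) ^ 2 := by
  set a := pvMnx H with ha
  set b := pvMxx H with hb
  set c := pvMny H with hc
  set d := pvMxy H with hd
  have hbnd : ∀ p ∈ H, a ≤ p.1 ∧ p.1 ≤ b ∧ c ≤ p.2 ∧ p.2 ≤ d := by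
    intro p hp
    exact ⟨(pv_foldl_min (fun p => p.1) H 100000).2 p hp,
      (pv_foldl_max (fun p => p.1) H (-1)).2 p hp,
      (pv_foldl_min (fun p => p.2) H 100000).2 p hp,
      (pv_foldl_max (fun p => p.2) H (-1)).2 p hp⟩
  have hnn : ∀ p ∈ H, 0 ≤ p.1 ∧ 0 ≤ p.2 := fun p hp => pv_hash_nonneg board p (hH ▸ hp)
  have ha0 : 0 ≤ a := pv_foldl_min_lb (fun p => p.1) H 100000 (by norm_num) (fun p hp => (hnn p hp).1)
  have hc0 : 0 ≤ c := pv_foldl_min_lb (fun p => p.2) H 100000 (by norm_num) (fun p hp => (hnn p hp).2)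
  obtain ⟨p0, hp0⟩ := List.exists_mem_of_ne_nil H hne
  have hab : a ≤ b := le_trans (hbnd p0 hp0).1 (hbnd p0 hp0).2.1
  have hcd : c ≤ d := le_trans (hbnd p0 hp0).2.2.1 (hbnd p0 hp0).2.2.2
  set box : Finset (Int × Int) := Finset.Icc a b ×ˢ Finset.Icc c d with hbox
  have hsub : H.toFinset ⊆ box := by
    intro p hp
    rw [List.mem_toFinset] at hp
    rcases hbnd p hp with ⟨h1, h2, h3, h4⟩
    simp [hbox, Finset.mem_product, Finset.mem_Icc, h1, h2, h3, h4]
  have hcardT : H.toFinset.card = H.length := List.toFinset_card_of_nodup (hH ▸ pv_hash_nodup board)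
  have hcardB : (box.card : Int) = (b - a + 1) * (d - c + 1) := by
    rw [hbox, Finset.card_product, Int.card_Icc, Int.card_Icc]
    push_cast [Int.toNat_of_nonneg (by omega : (0:Int) ≤ b + 1 - a),
      Int.toNat_of_nonneg (by omega : (0:Int) ≤ d + 1 - c)]
    ring
  have hlhs : ((PySem.List.pyRange a (b + 1) 1).all (fun x =>
        (PySem.List.pyRange c (d + 1) 1).all (fun y =>
          match PySem.List.pyGet? board x with
          | some line =>
            match PySem.Str.pyGet? line y with
            | some c => c == '#'
            | none => false
          | none => false)) = true) ↔ box ⊆ H.toFinset := by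
    rw [List.all_eq_true]
    constructor
    · intro h p hp
      rw [hbox, Finset.mem_product, Finset.mem_Icc, Finset.mem_Icc] at hp
      have h1 := h p.1 (by rw [PySem.List.mem_pyRange_one]; omega)
      rw [List.all_eq_true] at h1
      have h2 := h1 p.2 (by rw [PySem.List.mem_pyRange_one]; omega)
      rw [pv_check_iff board p.1 p.2 (by omega) (by omega)] at h2
      rw [List.mem_toFinset, hH]
      simpa using h2
    · intro h x hx
      rw [List.all_eq_true]
      intro y hy
      rw [PySem.List.mem_pyRange_one] at hx hy
      rw [pv_check_iff board x y (by omega) (by omega), ← hH, ← List.mem_toFinset]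
      exact h (by rw [hbox, Finset.mem_product, Finset.mem_Icc, Finset.mem_Icc]; omega)
  rw [hlhs]
  constructor
  · intro h
    have heq : H.toFinset = box := Finset.Subset.antisymm hsub h
    have hc' : (H.length : Int) = (b - a + 1) * (d - c + 1) := by
      rw [← hcardT, heq, hcardB]
    rw [hc', hsq]
    ring
  · intro h
    have hcards : box.card ≤ H.toFinset.card := by
      have : (H.toFinset.card : Int) = (box.card : Int) := by
        rw [hcardT, hcardB, h, sq, hsq]
      omega
    have hbs : box ⊆ H.toFinset := by
      rw [Finset.eq_of_subset_of_card_le hsub hcards]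
    exact hbs

-- ===== VERDICT (by name: the statement is the Claim_ definition above) =====
theorem solve_spec : Claim_equal_solve := by
  intro board _ _
  show solve board = solve_alt board
  unfold solve solve_alt
  rw [pv_stA, pv_stB]
  dsimp only
  set H := pvHash board with hHdef
  by_cases hemp : H.isEmpty
  · have h0 : H = [] := List.isEmpty_iff.mp hemp
    rw [if_pos hemp, if_pos (by simp [h0])]
  · have hne : H ≠ [] := fun h => hemp (by simp [h])
    have hlen0 : ¬ ((H.length : Int) = 0) := by
      have := List.length_pos_of_ne_nil hne
      omega
    rw [if_neg (by simp [hemp]), if_neg hlen0]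
    by_cases hsq : pvMxx H - pvMnx H = pvMxy H - pvMny H
    · rw [if_neg (by omega : ¬ pvMxx H - pvMnx H ≠ pvMxy H - pvMny H)]
      by_cases hcnt : (H.length : Int) = (pvMxx H - pvMnx H + 1) ^ 2
      · rw [if_pos ((pv_main board H hHdef hne hsq).mpr hcnt), if_pos ⟨hsq, hcnt⟩]
      · rw [if_neg (fun h => hcnt ((pv_main board H hHdef hne hsq).mp h)),
          if_neg (fun h => hcnt h.2)]
    · rw [if_pos hsq, if_neg (fun h => hsq h.1)]
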